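-- pv_equiv track=rewrite | github.com/JFF-Bohdan/sim-module | lib/sim900/gsm.py | removeEndResult
-- ===== SOURCE A (Python) =====
-- def removeEndResult(strings, targetString):
--     """
--     Searches and removes last string which contains result
--     :param strings:
--     :param targetString:
--     :return:
--     """
--     ret = ""
--
--     #searching for target string
--     while len(strings) > 0:
--         s = str(strings[-1]).strip()
--
--         strings.pop(len(strings)-1)
--         if s == targetString:
--             break
--
--     #compiling result
--     qty = len(strings)
--     for i in range(qty):
--         ret += strings[i]
--
--     return ret
-- ===== SOURCE B (Python) =====
-- def removeEndResult(strings, targetString):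
--     # Scan indices from last to first for the cut point, then slice-and-join.
--     # Performs the same in-place truncation of `strings` as the original.
--     cut = None
--     i = len(strings)
--     while cut is None and i > 0:
--         i -= 1
--         if str(strings[i]).strip() == targetString:
--             cut = i
--     if cut is None:
--         result = ""
--         del strings[:]
--     else:
--         result = "".join(strings[:cut])
--         del strings[cut:]
--     return result
-- ===== Notes on version B (the rewrite author's own statement) =====
-- stated objective: simpler
-- what changed: Replaces the destructive pop-until-match loop plus an element-by-element += concatenation loop with a backwards index search for the cut point followed by a single slice-and-join (and one in-place truncation).
import Mathlib
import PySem

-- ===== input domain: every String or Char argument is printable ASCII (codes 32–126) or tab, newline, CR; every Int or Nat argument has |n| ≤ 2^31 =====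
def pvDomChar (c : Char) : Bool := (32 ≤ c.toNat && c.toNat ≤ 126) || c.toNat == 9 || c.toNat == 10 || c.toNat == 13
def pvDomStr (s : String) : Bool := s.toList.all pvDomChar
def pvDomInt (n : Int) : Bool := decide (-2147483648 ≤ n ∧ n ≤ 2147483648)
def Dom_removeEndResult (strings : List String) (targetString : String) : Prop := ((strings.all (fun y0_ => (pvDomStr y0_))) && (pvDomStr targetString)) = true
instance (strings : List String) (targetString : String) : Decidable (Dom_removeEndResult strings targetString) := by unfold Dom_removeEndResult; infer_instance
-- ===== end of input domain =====

-- B replaces A's destructive pop-until-match loop + per-index concatenation loop with a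
-- backwards index search for the cut point followed by slice-and-join (objective: simpler).
-- A and B mutate the Python argument list identically; the theorems are about the return value.


-- ===== PORT A =====
-- the `while len(strings) > 0:` loop; returns the final state of `strings`
def removeEndResultLoop (strings : List String) (targetString : String) : List String :=
  if _h : strings.length > 0 then
    -- s = str(strings[-1]).strip()  (index -1 is valid since the list is nonempty)
    let s := PySem.Str.strip ((PySem.List.pyGet? strings (-1)).getD "")
    -- strings.pop(len(strings)-1)
    let rest := strings.dropLast
    if s = targetString then rest else removeEndResultLoop rest targetString
  else strings
termination_by strings.length
decreasing_by simpa [List.length_dropLast] using Nat.sub_lt _h one_pos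

def removeEndResult (strings : List String) (targetString : String) : String :=
  let remaining := removeEndResultLoop strings targetString
  -- for i in range(qty): ret += strings[i]   (each index i < qty is in range)
  (List.range remaining.length).foldl (fun ret i => ret ++ remaining.getD i "") ""

-- ===== PORT B =====
-- the `while cut is None and i > 0:` countdown search, recursing on i
def findCut (strings : List String) (targetString : String) : Nat → Option Nat
  | 0 => none
  | i + 1 =>
      if PySem.Str.strip (strings.getD i "") = targetString then some i
      else findCut strings targetString i

def removeEndResult_alt (strings : List String) (targetString : String) : String :=
  match findCut strings targetString strings.length with
  | some cut =>
      -- "".join(strings[:cut]) : joining with the empty separator is left-to-right concatenation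
      (strings.take cut).foldl (fun r s => r ++ s) ""
  | none => ""

-- ===== PRECONDITION & SPEC =====
def Spec_removeEndResult (strings : List String) (targetString : String) (out : String) : Prop := out = removeEndResult_alt strings targetString
instance (strings : List String) (targetString : String) (out : String) : Decidable (Spec_removeEndResult strings targetString out) := by unfold Spec_removeEndResult; infer_instance

-- ===== CLAIM (what is proved, stated in full; the proofs are below) =====
def Claim_equal_removeEndResult : Prop := ∀ (strings : List String) (targetString : String), Dom_removeEndResult strings targetString → Spec_removeEndResult strings targetString (removeEndResult strings targetString)

-- ===== LEMMAS AND PROOFS =====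

theorem findCut_lt {xs : List String} {t : String} {i c : Nat}
    (h : findCut xs t i = some c) : c < i := by
  induction i with
  | zero => simp [findCut] at h
  | succ i ih =>
      simp only [findCut] at h
      split at h
      · simp_all
      · exact Nat.lt_succ_of_lt (ih h)

theorem findCut_append {ys : List String} {a : String} {t : String} :
    ∀ {i : Nat}, i ≤ ys.length → findCut (ys ++ [a]) t i = findCut ys t i := by
  intro i
  induction i with
  | zero => intro _; rfl
  | succ i ih =>
      intro hi
      have hlt : i < ys.length := hi
      simp only [findCut, List.getD_eq_getElem?_getD, List.getElem?_append_left hlt,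
        ih (Nat.le_of_lt hlt)]

theorem loop_eq (t : String) (xs : List String) :
    removeEndResultLoop xs t =
      (match findCut xs t xs.length with
       | some c => xs.take c
       | none => []) := by
  induction xs using List.reverseRecOn with
  | nil => simp [removeEndResultLoop, findCut]
  | append_singleton ys a ih =>
      rw [removeEndResultLoop]
      have hlen : (ys ++ [a]).length = ys.length + 1 := by simp
      have hget : (PySem.List.pyGet? (ys ++ [a]) (-1)).getD "" = a := by
        simp [PySem.List.pyGet?, PySem.List.pyIdx?, hlen]
      have hgetD : (ys ++ [a]).getD ys.length "" = a := by
        simp [List.getD_eq_getElem?_getD]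
      rw [dif_pos (by simp)]
      simp only [hget, List.dropLast_concat, hlen, findCut, hgetD]
      by_cases hs : PySem.Str.strip a = t
      · simp [hs]
      · rw [if_neg hs, if_neg hs, ih, findCut_append (Nat.le_refl _)]
        cases hfc : findCut ys t ys.length with
        | none => simp
        | some c =>
            have hc : c < ys.length := findCut_lt hfc
            simp [List.take_append_of_le_length (Nat.le_of_lt hc)]

theorem rangefold_eq (l : List String) :
    (List.range l.length).foldl (fun ret i => ret ++ l.getD i "") "" =
      l.foldl (fun r s => r ++ s) "" := by
  have hmap : (List.range l.length).map (fun i => l.getD i "") = l := by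
    apply List.ext_getElem
    · simp
    · intro i h1 h2
      simp [List.getD_eq_getElem?_getD, List.getElem?_eq_getElem h2]
  conv_rhs => rw [← hmap]
  rw [List.foldl_map]

-- ===== VERDICT (by name: the statement is the Claim_ definition above) =====
theorem removeEndResult_spec : Claim_equal_removeEndResult := by
  intro xs t _
  unfold Spec_removeEndResult removeEndResult removeEndResult_alt
  rw [loop_eq]
  cases hfc : findCut xs t xs.length with
  | none => simp
  | some c => simp only; rw [rangefold_eq]
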